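-- pv_equiv track=rewrite | github.com/sissbruecker/linkding | dsl.py | _pos_to_line_col
-- ===== SOURCE A (Python) =====
-- def _pos_to_line_col(script: str, pos: int):
--     line = 1
--     col = 1
--     for i in range(pos):
--         if script[i] == "\n":
--             line += 1
--             col = 1
--         else:
--             col += 1
--     return line, col
-- ===== SOURCE B (Python) =====
-- def _pos_to_line_col(script: str, pos: int):
--     prefix = script[:pos] if pos > 0 else ""
--     parts = prefix.split("\n")
--     return len(parts), len(parts[-1]) + 1
-- ===== Notes on version B (the rewrite author's own statement) =====
-- stated objective: simpler
-- what changed: Replaces the character-by-character line/column counting loop with slicing the prefix script[:pos], splitting it on '\n', and reading line = number of parts and column = length of the last part + 1.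
import Mathlib
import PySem

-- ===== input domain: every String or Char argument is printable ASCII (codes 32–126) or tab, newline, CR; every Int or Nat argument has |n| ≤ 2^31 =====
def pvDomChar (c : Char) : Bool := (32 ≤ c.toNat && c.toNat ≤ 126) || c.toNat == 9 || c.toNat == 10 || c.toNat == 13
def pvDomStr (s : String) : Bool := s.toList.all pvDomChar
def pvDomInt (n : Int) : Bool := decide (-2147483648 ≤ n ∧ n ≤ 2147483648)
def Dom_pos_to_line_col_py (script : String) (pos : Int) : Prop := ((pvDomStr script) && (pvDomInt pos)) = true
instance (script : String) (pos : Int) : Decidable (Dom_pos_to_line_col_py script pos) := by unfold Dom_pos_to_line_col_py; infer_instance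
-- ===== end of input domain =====

-- B replaces A's character-by-character line/column counter with a split-and-measure
-- decomposition (slice the prefix, split it on newlines, read off line and column); objective: simpler.

-- ===== PORT A =====
-- literal port of A's counting loop: for i in range(pos): if script[i] == "\n" …
def pos_to_line_col_py (script : String) (pos : Int) : Int × Int :=
  (PySem.List.pyRange 0 pos 1).foldl
    (fun (lc : Int × Int) i =>
      if PySem.List.pyGet? script.toList i = some '\n' then (lc.1 + 1, 1) else (lc.1, lc.2 + 1))
    (1, 1)

-- ===== PORT B =====
-- port of Source B: prefix = script[:pos] if pos > 0 else ""; parts = prefix.split("\n");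
-- split("\n") is ported as the Mathlib stdlib function List.splitOn '\n';
-- parts[-1] is exact as getLastD since split always returns a nonempty list.
def pos_to_line_col_py_alt (script : String) (pos : Int) : Int × Int :=
  let pre : List Char := if pos > 0 then PySem.List.slice script.toList none (some pos) else []
  let parts : List (List Char) := pre.splitOn '\n'
  ((parts.length : Int), ((parts.getLastD []).length : Int) + 1)

-- ===== PRECONDITION & SPEC =====
-- A indexes script[i] for i in range(pos), so it raises IndexError when pos > len(script);
-- exactly those inputs are excluded (negative pos is fine: the loop is empty).
def Pre_pos_to_line_col_py (script : String) (pos : Int) : Prop := pos ≤ (script.toList.length : Int)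
instance (script : String) (pos : Int) : Decidable (Pre_pos_to_line_col_py script pos) := by
  unfold Pre_pos_to_line_col_py; infer_instance

def pvWitness_pos_to_line_col_py : String × Int := ("a\nb", 2)

def Spec_pos_to_line_col_py (script : String) (pos : Int) (out : Int × Int) : Prop := out = pos_to_line_col_py_alt script pos
instance (script : String) (pos : Int) (out : Int × Int) : Decidable (Spec_pos_to_line_col_py script pos out) := by unfold Spec_pos_to_line_col_py; infer_instance

-- ===== CLAIM (what is proved, stated in full; the proofs are below) =====
def Claim_equal_pos_to_line_col_py : Prop := ∀ (script : String) (pos : Int), Dom_pos_to_line_col_py script pos → Pre_pos_to_line_col_py script pos → Spec_pos_to_line_col_py script pos (pos_to_line_col_py script pos)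

-- ===== LEMMAS AND PROOFS =====

-- the character step both sides reduce to
def pvStep (lc : Int × Int) (c : Char) : Int × Int :=
  if c = '\n' then (lc.1 + 1, 1) else (lc.1, lc.2 + 1)

lemma pv_getLastD_modifyHead {α : Type} (f : α → α) (a b : α) (l : List α) (d : α) :
    ((a :: b :: l).modifyHead f).getLastD d = (b :: l).getLastD d := by
  simp [List.modifyHead]

-- A's range loop over indices is the fold of pvStep over the taken prefix
lemma pv_rangefold (l : List Char) (n : Nat) (hn : n ≤ l.length) (init : Int × Int) :
    (List.range n).foldl
      (fun lc k => if l[k]? = some '\n' then (lc.1 + 1, 1) else (lc.1, lc.2 + 1)) init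
    = (l.take n).foldl pvStep init := by
  induction n generalizing init with
  | zero => simp
  | succ m ih =>
    have hm : m < l.length := by omega
    rw [List.range_succ, List.foldl_append, ih (by omega), List.take_add_one,
      List.foldl_append]
    simp [pvStep, List.getElem?_eq_getElem hm]

-- the fold of pvStep, characterised by splitOn '\n'
lemma pv_fold_split (l : List Char) (L C : Int) :
    l.foldl pvStep (L, C)
    = (L + ((l.splitOn '\n').length : Int) - 1,
       (((l.splitOn '\n').getLastD []).length : Int)
         + (if (l.splitOn '\n').length = 1 then C else 1)) := by
  induction l generalizing L C with
  | nil => simp [List.splitOn]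
  | cons c t ih =>
    have hne : t.splitOn '\n' ≠ [] := List.splitOnP_ne_nil _ t
    by_cases hc : c = '\n'
    · subst hc
      rw [List.foldl_cons]
      have hstep : pvStep (L, C) '\n' = (L + 1, 1) := by simp [pvStep]
      rw [hstep, ih]
      have hsp : (('\n' :: t).splitOn '\n') = [] :: t.splitOn '\n' := by
        simp [List.splitOn, List.splitOnP_cons]
      rw [hsp]
      rcases ht : t.splitOn '\n' with _ | ⟨h, r⟩
      · exact absurd ht hne
      · rw [Prod.mk.injEq]
        simp only [List.getLastD_cons, List.length_cons]
        refine ⟨by push_cast; ring, ?_⟩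
        rw [ite_self, if_neg (by omega)]
    · rw [List.foldl_cons]
      have hstep : pvStep (L, C) c = (L, C + 1) := by simp [pvStep, hc]
      rw [hstep, ih]
      have hsp : ((c :: t).splitOn '\n') = (t.splitOn '\n').modifyHead (List.cons c) := by
        simp [List.splitOn, List.splitOnP_cons, hc]
      rw [hsp, List.length_modifyHead]
      rcases ht : t.splitOn '\n' with _ | ⟨h, r⟩
      · exact absurd ht hne
      · rcases r with _ | ⟨h2, r2⟩
        · rw [Prod.mk.injEq]
          simp only [List.modifyHead, List.getLastD_cons, List.getLastD_nil, List.length_cons,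
            List.length_nil]
          refine ⟨by trivial, ?_⟩
          simp only [if_true]
          push_cast; ring
        · rw [pv_getLastD_modifyHead, Prod.mk.injEq]
          simp only [List.getLastD_cons, List.length_cons]
          refine ⟨by trivial, ?_⟩
          rw [if_neg (by omega), if_neg (by omega)]

-- ===== VERDICT (by name: the statement is the Claim_ definition above) =====
theorem pos_to_line_col_py_spec : Claim_equal_pos_to_line_col_py := by
  intro script pos _hdom hpre
  unfold Spec_pos_to_line_col_py pos_to_line_col_py pos_to_line_col_py_alt
  by_cases hp : pos > 0
  · have h0 : 0 ≤ pos := le_of_lt hp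
    have hn : pos.toNat ≤ script.toList.length := by
      unfold Pre_pos_to_line_col_py at hpre; omega
    have hcast : pos = ((pos.toNat : Nat) : Int) := by omega
    rw [if_pos hp, PySem.List.slice_to _ h0]
    rw [hcast, PySem.List.pyRange_zero, List.foldl_map]
    simp only [Int.toNat_natCast]
    have hget : ∀ (lc : Int × Int) (k : Nat),
        (if PySem.List.pyGet? script.toList ((k : Nat) : Int) = some '\n'
          then (lc.1 + 1, 1) else (lc.1, lc.2 + 1))
        = (if script.toList[k]? = some '\n' then (lc.1 + 1, 1) else (lc.1, lc.2 + 1)) := by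
      intro lc k; rw [PySem.List.pyGet?_natCast]
    simp only [hget]
    rw [pv_rangefold _ _ hn, pv_fold_split, Prod.mk.injEq]
    refine ⟨by ring, by rw [ite_self]⟩
  · rw [if_neg hp]
    have : PySem.List.pyRange 0 pos 1 = [] := by
      rw [PySem.List.pyRange_zero]
      have : pos.toNat = 0 := by omega
      simp [this]
    rw [this]
    simp [List.splitOn]
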